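-- pv_equiv track=rewrite | github.com/adrijasurroy/DSA | amazon_delivery_center.py | count_recursive
-- ===== SOURCE A (Python) =====
-- def count_recursive(center, d, left, right):
--     if left > right:
--         return 0
--
--     mid = (left + right) // 2
--     mid_location = center[mid]
--
--     count_left = count_recursive(center, d, left, mid - 1)
--     count_right = count_recursive(center, d, mid + 1, right)
--
--     count = count_left + count_right
--
--     for i in range(left, right + 1):
--         count += min(abs(mid_location - center[i]), d)
--
--     return count
-- ===== SOURCE B (Python) =====
-- def count_recursive(center, d, left, right):
--     total = 0
--     stack = [(left, right)]
--     while stack: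
--         l, r = stack.pop()
--         if l > r:
--             continue
--         mid = (l + r) // 2
--         m = center[mid]
--         total += sum(min(abs(m - center[i]), d) for i in range(l, r + 1))
--         stack.append((l, mid - 1))
--         stack.append((mid + 1, r))
--     return total
-- ===== Notes on version B (the rewrite author's own statement) =====
-- stated objective: alternative
-- what changed: Replaces the recursion with an explicit stack of (l,r) ranges and one flat accumulator: each popped range contributes its inner capped-distance sum and pushes its two sub-ranges; integer addition is commutative so the flat accumulation equals the recursive left+right+inner grouping.
import Mathlib
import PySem

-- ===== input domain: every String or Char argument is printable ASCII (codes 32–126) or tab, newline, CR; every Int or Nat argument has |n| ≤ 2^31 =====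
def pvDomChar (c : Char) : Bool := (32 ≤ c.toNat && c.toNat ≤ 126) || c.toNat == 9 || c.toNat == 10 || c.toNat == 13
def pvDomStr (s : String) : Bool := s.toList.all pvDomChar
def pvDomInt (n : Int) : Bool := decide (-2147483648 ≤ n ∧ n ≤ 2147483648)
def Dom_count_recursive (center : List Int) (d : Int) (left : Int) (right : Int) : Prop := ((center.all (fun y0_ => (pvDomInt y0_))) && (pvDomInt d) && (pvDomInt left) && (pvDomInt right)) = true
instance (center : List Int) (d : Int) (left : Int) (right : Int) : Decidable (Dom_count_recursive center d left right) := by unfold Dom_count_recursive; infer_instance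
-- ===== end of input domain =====

-- B replaces A's recursion by an explicit stack of ranges with one flat accumulator (alternative decomposition; same cost).

-- ===== PORT A =====
-- count_recursive: literal port of A's recursion; center[i] is ported as pyGetD
-- (exact Python indexing, incl. negative wraparound, on in-range indices; Pre_ excludes IndexError).
-- The recursion is guarded by fuel = range size, which only makes it total: with enough fuel
-- (always supplied by the wrapper) the fuel-0 branch is unreachable.
def count_recursive_fuel (center : List Int) (d : Int) : Nat → Int → Int → Int
  | 0, _, _ => 0
  | fuel + 1, left, right =>
    if left > right then 0
    else
      let mid := PySem.Int.floordiv (left + right) 2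
      let mid_location := PySem.List.pyGetD center mid 0
      let count_left := count_recursive_fuel center d fuel left (mid - 1)
      let count_right := count_recursive_fuel center d fuel (mid + 1) right
      (PySem.List.pyRange left (right + 1) 1).foldl
        (fun count i => count + min |mid_location - PySem.List.pyGetD center i 0| d)
        (count_left + count_right)

def count_recursive (center : List Int) (d : Int) (left : Int) (right : Int) : Int :=
  count_recursive_fuel center d (right - left + 1).toNat left right

-- ===== PORT B =====
-- the while-loop of Source B: state = (total, stack); stack top is the list head (python pop()/append at the end)
def count_recursive_alt_loop (center : List Int) (d : Int) :
    Nat → Int → List (Int × Int) → Int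
  | 0, total, _ => total
  | _ + 1, total, [] => total
  | fuel + 1, total, (l, r) :: rest =>
    if l > r then count_recursive_alt_loop center d fuel total rest
    else
      let mid := PySem.Int.floordiv (l + r) 2
      let m := PySem.List.pyGetD center mid 0
      let node := (PySem.List.pyRange l (r + 1) 1).foldl
        (fun s i => s + min |m - PySem.List.pyGetD center i 0| d) 0
      count_recursive_alt_loop center d fuel (total + node) ((mid + 1, r) :: (l, mid - 1) :: rest)

def count_recursive_alt (center : List Int) (d : Int) (left : Int) (right : Int) : Int :=
  count_recursive_alt_loop center d (2 * (right - left + 1).toNat + 1) 0 [(left, right)]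

-- ===== PRECONDITION & SPEC =====
-- Pre_ excludes exactly the inputs where Python A raises IndexError: a nonempty range
-- whose visited indices left..right leave Python's valid index window [-len, len).
def Pre_count_recursive (center : List Int) (d : Int) (left : Int) (right : Int) : Prop :=
  left > right ∨ (-(center.length : Int) ≤ left ∧ right < (center.length : Int))
instance (center : List Int) (d : Int) (left : Int) (right : Int) : Decidable (Pre_count_recursive center d left right) := by unfold Pre_count_recursive; infer_instance

def pvWitness_count_recursive : List Int × Int × Int × Int := ([3, -1, 7, 4], 2, 0, 3)

def Spec_count_recursive (center : List Int) (d : Int) (left : Int) (right : Int) (out : Int) : Prop := out = count_recursive_alt center d left right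
instance (center : List Int) (d : Int) (left : Int) (right : Int) (out : Int) : Decidable (Spec_count_recursive center d left right out) := by unfold Spec_count_recursive; infer_instance

-- ===== CLAIM (what is proved, stated in full; the proofs are below) =====
def Claim_equal_count_recursive : Prop := ∀ (center : List Int) (d : Int) (left : Int) (right : Int), Dom_count_recursive center d left right → Pre_count_recursive center d left right → Spec_count_recursive center d left right (count_recursive center d left right)

-- ===== LEMMAS AND PROOFS =====

-- proof-side stack measure: twice the total size of the ranges on the stack plus the stack
-- length; it drops by at least 1 per loop iteration, so it bounds the loop's fuel needs
def pvStackSize (st : List (Int × Int)) : Nat :=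
  (st.map (fun p => (p.2 - p.1 + 1).toNat)).sum

-- enough fuel: the result does not depend on the fuel once it reaches the range size
theorem count_recursive_fuel_mono (center : List Int) (d : Int) :
    ∀ (n m : Nat) (l r : Int), (r - l + 1).toNat ≤ n → n ≤ m →
      count_recursive_fuel center d n l r = count_recursive_fuel center d m l r := by
  intro n
  induction n with
  | zero =>
    intro m l r hs _
    have hlr : l > r := by omega
    cases m with
    | zero => rfl
    | succ m => simp [count_recursive_fuel, hlr]
  | succ n ih =>
    intro m l r hs hm
    cases m with
    | zero => omega
    | succ m =>
      by_cases hlr : l > r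
      · simp [count_recursive_fuel, hlr]
      · rw [count_recursive_fuel, count_recursive_fuel]
        simp only [if_neg hlr]
        have hmid := PySem.Int.floordiv_two_mid_bounds (lo := l) (hi := r) (by omega)
        rw [ih m l (PySem.Int.floordiv (l + r) 2 - 1) (by omega) (by omega),
            ih m (PySem.Int.floordiv (l + r) 2 + 1) r (by omega) (by omega)]

-- unfolding count_recursive itself on a nonempty range
theorem count_recursive_unfold (center : List Int) (d : Int) (l r : Int) (hlr : ¬ l > r) :
    count_recursive center d l r
      = (PySem.List.pyRange l (r + 1) 1).foldl
          (fun count i =>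
            count + min |PySem.List.pyGetD center (PySem.Int.floordiv (l + r) 2) 0
                          - PySem.List.pyGetD center i 0| d)
          (count_recursive center d l (PySem.Int.floordiv (l + r) 2 - 1)
            + count_recursive center d (PySem.Int.floordiv (l + r) 2 + 1) r) := by
  unfold count_recursive
  have hmid := PySem.Int.floordiv_two_mid_bounds (lo := l) (hi := r) (by omega)
  obtain ⟨k, hk⟩ : ∃ k, (r - l + 1).toNat = k + 1 := ⟨(r - l).toNat, by omega⟩
  rw [hk, count_recursive_fuel]
  simp only [if_neg hlr]
  rw [← count_recursive_fuel_mono center d ((PySem.Int.floordiv (l + r) 2 - 1) - l + 1).toNat k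
        l (PySem.Int.floordiv (l + r) 2 - 1) (by omega) (by omega)]
  rw [← count_recursive_fuel_mono center d (r - (PySem.Int.floordiv (l + r) 2 + 1) + 1).toNat k
        (PySem.Int.floordiv (l + r) 2 + 1) r (by omega) (by omega)]

-- with fuel ≥ its measure, the loop returns total plus the A-values of all stacked ranges
theorem count_recursive_alt_loop_eq (center : List Int) (d : Int) :
    ∀ (fuel : Nat) (total : Int) (stack : List (Int × Int)),
      2 * pvStackSize stack + stack.length ≤ fuel →
      count_recursive_alt_loop center d fuel total stack
        = total + (stack.map (fun p => count_recursive center d p.1 p.2)).sum := by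
  intro fuel
  induction fuel with
  | zero =>
    intro total stack h
    have : stack = [] := by
      cases stack with
      | nil => rfl
      | cons p rest => simp [pvStackSize] at h
    subst this
    simp [count_recursive_alt_loop]
  | succ fuel ih =>
    intro total stack h
    match stack with
    | [] => simp [count_recursive_alt_loop]
    | (l, r) :: rest =>
      have hsz : pvStackSize ((l, r) :: rest) = (r - l + 1).toNat + pvStackSize rest := by
        simp [pvStackSize]
      by_cases hlr : l > r
      · rw [count_recursive_alt_loop, if_pos hlr,
            ih total rest (by simp [pvStackSize] at h ⊢; omega),
            List.map_cons, List.sum_cons]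
        have h0 : count_recursive center d l r = 0 := by
          unfold count_recursive
          have : (r - l + 1).toNat = 0 := by omega
          rw [this, count_recursive_fuel]
        rw [h0]; ring
      · rw [count_recursive_alt_loop, if_neg hlr]
        have hmid := PySem.Int.floordiv_two_mid_bounds (lo := l) (hi := r) (by omega)
        rw [ih _ _ (by simp [pvStackSize] at h ⊢; omega)]
        rw [List.map_cons, List.map_cons, List.map_cons, List.sum_cons, List.sum_cons,
            List.sum_cons]
        rw [count_recursive_unfold center d l r hlr]
        rw [PySem.List.foldl_add (g := fun i =>
          min |PySem.List.pyGetD center (PySem.Int.floordiv (l + r) 2) 0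
                - PySem.List.pyGetD center i 0| d)]
        rw [PySem.List.foldl_add (g := fun i =>
          min |PySem.List.pyGetD center (PySem.Int.floordiv (l + r) 2) 0
                - PySem.List.pyGetD center i 0| d)]
        simp only []
        ring

-- ===== VERDICT (by name: the statement is the Claim_ definition above) =====
theorem count_recursive_spec : Claim_equal_count_recursive := by
  intro center d left right _ _
  unfold Spec_count_recursive count_recursive_alt
  rw [count_recursive_alt_loop_eq center d _ 0 [(left, right)] (by simp [pvStackSize])]
  simp
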